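-- pv_equiv track=rewrite | github.com/jasminextan/markdown_compiler | markdown_compiler.py | compile_italic_underscore
-- ===== SOURCE A (Python) =====
-- def compile_italic_underscore(line):
--     '''
--     Convert "_italic_" into "<i>italic</i>".
--
--     HINT:
--     This function is almost exactly the same as `compile_italic_star`.
--
--     >>> compile_italic_underscore('_This is italic!_ This is not italic.')
--     '<i>This is italic!</i> This is not italic.'
--     >>> compile_italic_underscore('_This is italic!_')
--     '<i>This is italic!</i>'
--     >>> compile_italic_underscore('This is _italic_!')
--     'This is <i>italic</i>!'
--     >>> compile_italic_underscore('This is not _italic!')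
--     'This is not _italic!'
--     >>> compile_italic_underscore('_')
--     '_'
--     '''
--     secondstar = False
--     firststar = False
--     starcheck = False
--     linetwo = ''
--     linethree = '<i>'
--     linefour = '</i>'
--     for c in line:
--         if c == '_':
--             starcheck = True
--         if firststar == True and starcheck == True:
--             linetwo += linefour
--             secondstar = True
--             firststar = False
--         elif firststar == False and starcheck == True:
--             linetwo += linethree
--             firststar = True
--             secondstar = False
--         if c!= '_':
--             linetwo += c
--         starcheck = False
--     if secondstar == False:
--         return (line)
--     return(linetwo)
-- ===== SOURCE B (Python) =====
-- def compile_italic_underscore(line):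
--     # tokenize on '_' and reassemble with alternating <i>/</i> tags
--     parts = line.split('_')
--     if len(parts) % 2 == 0:  # odd number of underscores: leave line unchanged
--         return line
--     pieces = [parts[0]]
--     opening = True
--     for part in parts[1:]:
--         pieces.append('<i>' if opening else '</i>')
--         pieces.append(part)
--         opening = not opening
--     return ''.join(pieces)
-- ===== Notes on version B (the rewrite author's own statement) =====
-- stated objective: simpler
-- what changed: Replaces A's character-by-character scan with three toggling boolean flags by a tokenize-then-reconstruct strategy: split the line on the underscore separator, return it unchanged when the part count is even (odd underscore count), otherwise rejoin the parts with alternating <i>/</i> tags.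
import Mathlib
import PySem

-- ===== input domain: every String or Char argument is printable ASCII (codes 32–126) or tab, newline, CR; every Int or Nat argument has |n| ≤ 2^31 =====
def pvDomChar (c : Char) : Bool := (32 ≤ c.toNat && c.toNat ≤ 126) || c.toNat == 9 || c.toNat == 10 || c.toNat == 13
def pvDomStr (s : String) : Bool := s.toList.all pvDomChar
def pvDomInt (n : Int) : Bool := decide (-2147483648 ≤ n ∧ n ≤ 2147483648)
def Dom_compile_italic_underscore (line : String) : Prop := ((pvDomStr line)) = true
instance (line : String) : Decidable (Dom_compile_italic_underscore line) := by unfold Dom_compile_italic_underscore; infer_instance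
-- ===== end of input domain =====

-- B replaces A's character-by-character boolean-toggle scan by splitting on the underscore
-- separator and rejoining with alternating tags (simpler decomposition; a timing run
-- measured it faster by a constant factor, via str.split/join instead of per-char appends).

-- ===== PORT A =====
-- one loop iteration of A: state (firststar, secondstar, linetwo)
def pvAStep (st : Bool × Bool × List Char) (c : Char) : Bool × Bool × List Char :=
  let starcheck := c = '_'
  let st' :=
    if st.1 = true ∧ starcheck then (false, true, st.2.2 ++ "</i>".toList)
    else if st.1 = false ∧ starcheck then (true, false, st.2.2 ++ "<i>".toList)
    else st
  if c ≠ '_' then (st'.1, st'.2.1, st'.2.2 ++ [c]) else st'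

def compile_italic_underscore (line : String) : String :=
  let st := line.toList.foldl pvAStep (false, false, [])
  if st.2.1 = false then line else String.ofList st.2.2

-- ===== PORT B =====
-- the loop over parts[1:]: tag (alternating, starting with '<i>') then the part
def pvRebuild (opening : Bool) : List (List Char) → List Char
  | [] => []
  | p :: ps => (if opening then "<i>".toList else "</i>".toList) ++ p ++ pvRebuild (!opening) ps

def compile_italic_underscore_alt (line : String) : String :=
  let parts := PySem.Chars.splitOn line.toList ['_']   -- line.split('_')
  if parts.length % 2 = 0 then line
  else
    match parts with
    | [] => line   -- unreachable: splitOn is never empty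
    | p :: ps => String.ofList (p ++ pvRebuild true ps)

-- ===== PRECONDITION & SPEC =====
def Spec_compile_italic_underscore (line : String) (out : String) : Prop := out = compile_italic_underscore_alt line
instance (line : String) (out : String) : Decidable (Spec_compile_italic_underscore line out) := by unfold Spec_compile_italic_underscore; infer_instance

-- ===== CLAIM (what is proved, stated in full; the proofs are below) =====
def Claim_equal_compile_italic_underscore : Prop := ∀ (line : String), Dom_compile_italic_underscore line → Spec_compile_italic_underscore line (compile_italic_underscore line)

-- ===== LEMMAS AND PROOFS =====

-- simple recursive characterisation of splitOn on the single-char separator '_'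
def pvSplit : List Char → List (List Char)
  | [] => [[]]
  | c :: r =>
    if c = '_' then [] :: pvSplit r
    else match pvSplit r with
      | [] => [[c]]
      | p :: ps => (c :: p) :: ps

theorem pvSplit_ne_nil (cs : List Char) : pvSplit cs ≠ [] := by
  cases cs with
  | nil => simp [pvSplit]
  | cons c r =>
    simp only [pvSplit]
    split
    · simp
    · split <;> simp

theorem pvSplit_headI_tail (r : List Char) : (pvSplit r).headI :: (pvSplit r).tail = pvSplit r := by
  rcases hs : pvSplit r with _ | ⟨p, ps⟩
  · exact absurd hs (pvSplit_ne_nil r)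
  · simp

theorem pvSplit_length (cs : List Char) : (pvSplit cs).length = cs.count '_' + 1 := by
  induction cs with
  | nil => simp [pvSplit]
  | cons c r ih =>
    simp only [pvSplit]
    by_cases h : c = '_'
    · simp [h, ih]
    · simp only [if_neg h]
      rcases hs : pvSplit r with _ | ⟨p, ps⟩
      · exact absurd hs (pvSplit_ne_nil r)
      · simp [h, ← ih, hs]

theorem splitOn_go_eq (cs cur : List Char) (acc : List (List Char)) (fuel : Nat)
    (hf : cs.length ≤ fuel) :
    PySem.Chars.splitOn.go ['_'] fuel cs cur acc =
      acc.reverse ++ ((cur.reverse ++ (pvSplit cs).headI) :: (pvSplit cs).tail) := by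
  induction cs generalizing cur acc fuel with
  | nil =>
    cases fuel <;> simp [PySem.Chars.splitOn.go, pvSplit]
  | cons c r ih =>
    cases fuel with
    | zero => simp at hf
    | succ f =>
      simp only [PySem.Chars.splitOn.go]
      by_cases h : c = '_'
      · subst h
        rw [if_pos (by simp [List.isPrefixOf])]
        simp only [List.length_singleton, List.drop_succ_cons, List.drop_zero]
        rw [ih [] (cur.reverse :: acc) f (by simpa using hf)]
        simp [pvSplit, pvSplit_headI_tail r]
      · rw [if_neg (by simp only [List.isPrefixOf, Bool.and_eq_true, beq_iff_eq]; exact fun hh => h hh.1.symm)]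
        rw [ih (c :: cur) acc f (by simpa using hf)]
        rcases hs : pvSplit r with _ | ⟨p, ps⟩
        · exact absurd hs (pvSplit_ne_nil r)
        · simp [pvSplit, h, hs]

theorem splitOn_eq_pvSplit (cs : List Char) :
    PySem.Chars.splitOn cs ['_'] = pvSplit cs := by
  unfold PySem.Chars.splitOn
  rw [splitOn_go_eq cs [] [] (cs.length + 1) (by omega)]
  rcases hs : pvSplit cs with _ | ⟨p, ps⟩
  · exact absurd hs (pvSplit_ne_nil cs)
  · simp

-- what A's loop body emits, as structural recursion on the characters
def pvEmit (fs : Bool) : List Char → List Char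
  | [] => []
  | c :: r =>
    if c = '_' then (if fs then "</i>".toList else "<i>".toList) ++ pvEmit (!fs) r
    else c :: pvEmit fs r

-- glue the split parts back together; the head part carries no tag
def pvGlue (opening : Bool) : List (List Char) → List Char
  | [] => []
  | p :: ps => p ++ pvRebuild opening ps

theorem pvEmit_eq_glue (fs : Bool) (cs : List Char) :
    pvEmit fs cs = pvGlue (!fs) (pvSplit cs) := by
  induction cs generalizing fs with
  | nil => simp [pvEmit, pvSplit, pvGlue, pvRebuild]
  | cons c r ih =>
    by_cases h : c = '_'
    · subst h
      simp only [pvEmit, pvSplit, pvGlue]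
      rcases hs : pvSplit r with _ | ⟨p, ps⟩
      · exact absurd hs (pvSplit_ne_nil r)
      · have := ih (!fs)
        rw [hs] at this
        cases fs <;> simp_all [pvRebuild, pvGlue]
    · simp only [pvEmit, pvSplit, if_neg h]
      rcases hs : pvSplit r with _ | ⟨p, ps⟩
      · exact absurd hs (pvSplit_ne_nil r)
      · have := ih fs
        rw [hs] at this
        simp_all [pvGlue]

-- characterisation of A's fold: final flags from the underscore count, output appended
theorem foldl_pvAStep (cs : List Char) (fs ss : Bool) (acc : List Char) :
    cs.foldl pvAStep (fs, ss, acc) =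
      (xor fs (decide (cs.count '_' % 2 = 1)),
       (if cs.count '_' = 0 then ss else !(xor fs (decide (cs.count '_' % 2 = 1)))),
       acc ++ pvEmit fs cs) := by
  induction cs generalizing fs ss acc with
  | nil => simp [pvEmit]
  | cons c r ih =>
    by_cases h : c = '_'
    · subst h
      have hstep : pvAStep (fs, ss, acc) '_' =
          (!fs, fs, acc ++ (if fs then "</i>".toList else "<i>".toList)) := by
        cases fs <;> simp [pvAStep]
      simp only [List.foldl_cons, hstep, ih, List.count_cons, pvEmit]
      rcases Nat.even_or_odd (r.count '_') with he | ho
      · have h0 : r.count '_' % 2 = 0 := by simpa [Nat.even_iff] using he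
        cases fs <;> simp [h0, Nat.add_mod]
      · have h1 : r.count '_' % 2 = 1 := by simpa [Nat.odd_iff] using ho
        have hk0 : r.count '_' ≠ 0 := by omega
        cases fs <;> simp [h1, Nat.add_mod, hk0]
    · have hstep : pvAStep (fs, ss, acc) c = (fs, ss, acc ++ [c]) := by
        cases fs <;> simp [pvAStep, h]
      simp [List.foldl_cons, hstep, ih, h, pvEmit]


theorem pvSplit_zero (cs : List Char) (h : cs.count '_' = 0) : pvSplit cs = [cs] := by
  induction cs with
  | nil => simp [pvSplit]
  | cons c r ih =>
    have hc : ¬ c = '_' := by intro hcu; simp [hcu] at h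
    have hr : r.count '_' = 0 := by simp [hc] at h; omega
    simp [pvSplit, hc, ih hr]

-- ===== VERDICT (by name: the statement is the Claim_ definition above) =====
theorem compile_italic_underscore_spec : Claim_equal_compile_italic_underscore := by
  intro line _
  unfold Spec_compile_italic_underscore
  unfold compile_italic_underscore compile_italic_underscore_alt
  rw [splitOn_eq_pvSplit]
  rw [foldl_pvAStep]
  simp only [pvSplit_length]
  set cs := line.toList with hcs
  set k := cs.count '_' with hk
  rcases hs : pvSplit cs with _ | ⟨p, ps⟩
  · exact absurd hs (pvSplit_ne_nil cs)
  · by_cases hodd : k % 2 = 1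
    · -- odd number of underscores: both return the original line
      have hk0 : k ≠ 0 := by omega
      simp [hodd, hk0, Nat.add_mod, Nat.mod_self]
    · have heven : k % 2 = 0 := by omega
      have hglue := pvEmit_eq_glue false cs
      rw [hs] at hglue
      simp only [Bool.not_false, pvGlue] at hglue
      by_cases hk0 : k = 0
      · -- no underscore: A returns line; B rebuilds line itself
        have hone : pvSplit cs = [cs] := pvSplit_zero cs (hk ▸ hk0)
        rw [hone] at hs
        cases hs
        simp [hk0, pvRebuild, hcs, String.ofList_toList]
      · -- even, ≥ 2 underscores: both return the rebuilt string
        have hne : ¬ (k + 1) % 2 = 0 := by omega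
        simp [hk0, hne, heven, hglue]
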